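-- pv_equiv track=rewrite | github.com/ebrimajaw/revisiting-serial-BGP-hijackers | compute_feature/compute_features.py | compute_daywise_max_visibility
-- ===== SOURCE A (Python) =====
-- from typing import Any, Dict, Iterable, List, Optional, Tuple
--
-- def compute_daywise_max_visibility(
--     v4: Dict[int, Dict[int, Dict[str, int]]],
--     v6: Dict[int, Dict[int, Dict[str, int]]],
-- ) -> Tuple[Dict[int, int], Dict[int, int]]:
--     day_max_v4: Dict[int, int] = {}
--     day_max_v6: Dict[int, int] = {}
--
--     for asn, days in v4.items():
--         for day, pfx_map in days.items():
--             if not pfx_map: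
--                 continue
--             mx = max(pfx_map.values())
--             cur = day_max_v4.get(day, 0)
--             if mx > cur:
--                 day_max_v4[day] = mx
--
--     for asn, days in v6.items():
--         for day, pfx_map in days.items():
--             if not pfx_map:
--                 continue
--             mx = max(pfx_map.values())
--             cur = day_max_v6.get(day, 0)
--             if mx > cur:
--                 day_max_v6[day] = mx
--     return day_max_v4, day_max_v6
-- ===== SOURCE B (Python) =====
-- from typing import Dict, Tuple
--
--
-- def compute_daywise_max_visibility(
--     v4: Dict[int, Dict[int, Dict[str, int]]],
--     v6: Dict[int, Dict[int, Dict[str, int]]],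
-- ) -> Tuple[Dict[int, int], Dict[int, int]]:
--     # Phase 1: group, per day, every positive per-pfx-map maximum across all ASNs.
--     # Phase 2: reduce each day's collected maxima with max().
--     def group_maxima(vis: Dict[int, Dict[int, Dict[str, int]]]) -> Dict[int, list]:
--         groups: Dict[int, list] = {}
--         for days in vis.values():
--             for day, pfx_map in days.items():
--                 if pfx_map:
--                     mx = max(pfx_map.values())
--                     if mx > 0:
--                         groups.setdefault(day, []).append(mx)
--         return groups
--
--     g4 = group_maxima(v4)
--     g6 = group_maxima(v6)
--     return (
--         {day: max(ms) for day, ms in g4.items()},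
--         {day: max(ms) for day, ms in g6.items()},
--     )
-- ===== Notes on version B (the rewrite author's own statement) =====
-- stated objective: alternative
-- what changed: Replaces A's interleaved per-day running-max updates with a two-phase group-then-reduce: one pass collects every positive per-pfx-map maximum into a day-keyed table of lists, a second pass reduces each day's list with max().
import Mathlib
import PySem

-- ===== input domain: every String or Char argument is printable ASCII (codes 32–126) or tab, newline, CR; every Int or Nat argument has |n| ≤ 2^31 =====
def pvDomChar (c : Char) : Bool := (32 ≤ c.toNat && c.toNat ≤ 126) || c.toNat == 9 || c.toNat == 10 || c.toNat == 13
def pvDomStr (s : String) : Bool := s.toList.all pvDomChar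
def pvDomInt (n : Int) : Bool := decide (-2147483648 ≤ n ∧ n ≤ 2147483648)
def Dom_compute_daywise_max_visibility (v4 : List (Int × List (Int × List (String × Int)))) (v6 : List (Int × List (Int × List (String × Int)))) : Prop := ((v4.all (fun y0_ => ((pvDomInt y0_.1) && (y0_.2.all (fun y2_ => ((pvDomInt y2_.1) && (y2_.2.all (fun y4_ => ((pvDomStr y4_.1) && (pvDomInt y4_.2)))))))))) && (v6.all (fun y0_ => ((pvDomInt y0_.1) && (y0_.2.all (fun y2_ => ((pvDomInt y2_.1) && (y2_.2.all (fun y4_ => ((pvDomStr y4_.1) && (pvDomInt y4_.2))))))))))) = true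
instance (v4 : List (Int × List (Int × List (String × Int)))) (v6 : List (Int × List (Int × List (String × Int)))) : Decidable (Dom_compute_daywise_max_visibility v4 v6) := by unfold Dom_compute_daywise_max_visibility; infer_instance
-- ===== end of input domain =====

-- B re-groups the positive per-pfx-map maxima per day and reduces them in a second
-- pass, instead of A's interleaved running-max; objective: alternative (same cost).

-- ===== PORT A =====
-- A's two loops are written out twice, as in the Python.
def compute_daywise_max_visibility (v4 : List (Int × List (Int × List (String × Int)))) (v6 : List (Int × List (Int × List (String × Int)))) : (List (Int × Int)) × (List (Int × Int)) :=
  let day_max_v4 : PySem.Dict Int Int :=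
    v4.foldl (fun acc p =>
      p.2.foldl (fun acc q =>
        if q.2 = [] then acc
        else
          -- pfx_map is nonempty here, so Python's max does not raise
          let mx := (PySem.List.max? (q.2.map (fun r => r.2)) id).getD 0
          let cur := acc.getD q.1 0
          if mx > cur then acc.insert q.1 mx else acc) acc) PySem.Dict.empty
  let day_max_v6 : PySem.Dict Int Int :=
    v6.foldl (fun acc p =>
      p.2.foldl (fun acc q =>
        if q.2 = [] then acc
        else
          let mx := (PySem.List.max? (q.2.map (fun r => r.2)) id).getD 0
          let cur := acc.getD q.1 0
          if mx > cur then acc.insert q.1 mx else acc) acc) PySem.Dict.empty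
  (day_max_v4.items, day_max_v6.items)

-- ===== PORT B =====
def pvGroupMaxima (vis : List (Int × List (Int × List (String × Int)))) : PySem.Dict Int (List Int) :=
  vis.foldl (fun groups p =>
    p.2.foldl (fun groups q =>
      if q.2 = [] then groups
      else
        let mx := (PySem.List.max? (q.2.map (fun r => r.2)) id).getD 0
        if mx > 0 then groups.modify q.1 [] (fun ms => ms ++ [mx]) else groups) groups)
    PySem.Dict.empty

def compute_daywise_max_visibility_alt (v4 : List (Int × List (Int × List (String × Int)))) (v6 : List (Int × List (Int × List (String × Int)))) : (List (Int × Int)) × (List (Int × Int)) :=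
  let g4 := pvGroupMaxima v4
  let g6 := pvGroupMaxima v6
  -- the dict comprehension: keys of the groups are distinct, so it is this item map
  (g4.items.map (fun p => (p.1, (PySem.List.max? p.2 id).getD 0)),
   g6.items.map (fun p => (p.1, (PySem.List.max? p.2 id).getD 0)))

-- ===== PRECONDITION & SPEC =====
def Spec_compute_daywise_max_visibility (v4 : List (Int × List (Int × List (String × Int)))) (v6 : List (Int × List (Int × List (String × Int)))) (out : (List (Int × Int)) × (List (Int × Int))) : Prop := out = compute_daywise_max_visibility_alt v4 v6
instance (v4 : List (Int × List (Int × List (String × Int)))) (v6 : List (Int × List (Int × List (String × Int)))) (out : (List (Int × Int)) × (List (Int × Int))) : Decidable (Spec_compute_daywise_max_visibility v4 v6 out) := by unfold Spec_compute_daywise_max_visibility; infer_instance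

-- ===== CLAIM (what is proved, stated in full; the proofs are below) =====
def Claim_equal_compute_daywise_max_visibility : Prop := ∀ (v4 : List (Int × List (Int × List (String × Int)))) (v6 : List (Int × List (Int × List (String × Int)))), Dom_compute_daywise_max_visibility v4 v6 → Spec_compute_daywise_max_visibility v4 v6 (compute_daywise_max_visibility v4 v6)

-- ===== LEMMAS AND PROOFS =====

-- the per-pfx-map maximum (0 never used: callers guard nonemptiness)
def pvMx (pfx : List (String × Int)) : Int := (PySem.List.max? (pfx.map (fun r => r.2)) id).getD 0

-- the stream of (day, max) events both nested loops process, in order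
def pvEvents (vis : List (Int × List (Int × List (String × Int)))) : List (Int × Int) :=
  vis.flatMap (fun p => p.2.filterMap (fun q => if q.2 = [] then none else some (q.1, pvMx q.2)))

def pvStepA (a : PySem.Dict Int Int) (e : Int × Int) : PySem.Dict Int Int :=
  if e.2 > a.getD e.1 0 then a.insert e.1 e.2 else a

def pvStepB (g : PySem.Dict Int (List Int)) (e : Int × Int) : PySem.Dict Int (List Int) :=
  if e.2 > 0 then g.modify e.1 [] (fun ms => ms ++ [e.2]) else g

def pvF2 (p : Int × List Int) : Int × Int := (p.1, (PySem.List.max? p.2 id).getD 0)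

def pvGood (g : PySem.Dict Int (List Int)) : Prop :=
  g.keys.Nodup ∧ ∀ p ∈ g.items, p.2 ≠ [] ∧ ∀ x ∈ p.2, 0 < x

lemma pv_inner {σ : Type} (step : σ → Int × Int → σ)
    (days : List (Int × List (String × Int))) (a : σ) :
    days.foldl (fun acc q => if q.2 = [] then acc else step acc (q.1, pvMx q.2)) a
      = (days.filterMap (fun q => if q.2 = [] then none else some (q.1, pvMx q.2))).foldl step a := by
  induction days generalizing a with
  | nil => rfl
  | cons q rest ih =>
      by_cases h : q.2 = [] <;> simp [h, ih]

lemma pv_nested {σ : Type} (step : σ → Int × Int → σ)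
    (vis : List (Int × List (Int × List (String × Int)))) (a : σ) :
    vis.foldl (fun acc p =>
      p.2.foldl (fun acc q => if q.2 = [] then acc else step acc (q.1, pvMx q.2)) acc) a
      = (pvEvents vis).foldl step a := by
  induction vis generalizing a with
  | nil => rfl
  | cons p rest ih =>
      simp only [List.foldl_cons]
      rw [ih, pv_inner]
      simp only [pvEvents, List.flatMap_cons, List.foldl_append]

lemma pv_max_append_none (vs : List Int) (x : Int) (h : PySem.List.max? vs id = none) :
    PySem.List.max? (vs ++ [x]) id = some x := by
  unfold PySem.List.max? at h ⊢
  rw [List.foldl_append, h]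
  rfl

lemma pv_max_append_some (vs : List Int) (x m : Int) (h : PySem.List.max? vs id = some m) :
    PySem.List.max? (vs ++ [x]) id = if m < x then some x else some m := by
  unfold PySem.List.max? at h ⊢
  rw [List.foldl_append, h]
  rfl

lemma pv_get?_map (l : List (Int × List Int)) (k : Int) :
    (PySem.Dict.mk (l.map pvF2)).get? k
      = ((PySem.Dict.mk l).get? k).map (fun vs => (PySem.List.max? vs id).getD 0) := by
  induction l with
  | nil => rfl
  | cons p rest ih =>
      rcases p with ⟨k', vs⟩
      by_cases h : k' = k <;> simp [pvF2, PySem.Dict.get?_mk_cons, h, ih]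

-- the value A keeps for a day is the reduced value of B's group for that day
lemma pv_getD_map (g : PySem.Dict Int (List Int)) (k : Int) :
    (PySem.Dict.mk (g.items.map pvF2)).getD k 0
      = match g.get? k with
        | none => 0
        | some vs => (PySem.List.max? vs id).getD 0 := by
  rw [PySem.Dict.getD_eq_get?_getD, pv_get?_map]
  cases g.get? k <;> rfl

lemma pv_contains_map (g : PySem.Dict Int (List Int)) (k : Int) :
    (PySem.Dict.mk (g.items.map pvF2)).contains k = g.contains k := by
  rw [PySem.Dict.contains_eq_isSome_get?, PySem.Dict.contains_eq_isSome_get?, pv_get?_map]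
  cases g.get? k <;> rfl

-- a stored group is nonempty with only positive entries, so its reduced value is positive
lemma pv_pos_of_get? (g : PySem.Dict Int (List Int)) (k : Int) (vs : List Int)
    (hG : pvGood g) (hget : g.get? k = some vs) :
    0 < (PySem.List.max? vs id).getD 0 := by
  obtain ⟨_, hval⟩ := hG
  have hmem := PySem.Dict.mem_items_of_get?_eq_some g hget
  obtain ⟨hne, hpos⟩ := hval _ hmem
  cases hmax : PySem.List.max? vs id with
  | none => exact absurd ((PySem.List.max?_eq_none_iff vs id).mp hmax) hne
  | some m => exact hpos m (PySem.List.max?_mem hmax)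

lemma pv_modify_items_none (g : PySem.Dict Int (List Int)) (k m : Int)
    (hget : g.get? k = none) :
    (g.modify k [] (fun ms => ms ++ [m])).items = g.items ++ [(k, [m])] := by
  have hcont : g.contains k = false := by
    rw [PySem.Dict.contains_eq_isSome_get?, hget]; rfl
  unfold PySem.Dict.modify
  rw [PySem.Dict.getD_eq_get?_getD, hget, PySem.Dict.items_insert_of_not_contains g _ hcont]
  rfl

lemma pv_modify_items_some (g : PySem.Dict Int (List Int)) (k m : Int) (vs : List Int)
    (hget : g.get? k = some vs) :
    (g.modify k [] (fun ms => ms ++ [m])).items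
      = g.items.map (fun p => if p.1 == k then (k, vs ++ [m]) else p) := by
  have hcont : g.contains k = true := by
    rw [PySem.Dict.contains_eq_isSome_get?, hget]; rfl
  unfold PySem.Dict.modify
  rw [PySem.Dict.getD_eq_get?_getD, hget, PySem.Dict.items_insert_of_contains g _ hcont]
  rfl

lemma pv_good_modify (g : PySem.Dict Int (List Int)) (k m : Int)
    (hG : pvGood g) (hm : 0 < m) :
    pvGood (g.modify k [] (fun ms => ms ++ [m])) := by
  obtain ⟨hnd, hval⟩ := hG
  constructor
  · -- keys stay Nodup
    rw [show (g.modify k [] (fun ms => ms ++ [m])).keys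
          = (g.insert k (g.getD k [] ++ [m])).keys from PySem.Dict.keys_modify g k [] _]
    by_cases hc : g.contains k = true
    · rw [PySem.Dict.keys_insert_of_contains g _ hc]; exact hnd
    · rw [PySem.Dict.keys_insert_of_not_contains g _ (by simpa using hc)]
      have hk : k ∉ g.keys := by
        have := PySem.Dict.contains_eq_decide_mem_keys g k
        rw [Bool.not_eq_true] at hc
        rw [hc] at this
        exact of_decide_eq_false this.symm
      have hdisj : ∀ a ∈ g.keys, ¬ a = k := fun a ha hak => hk (hak ▸ ha)
      simp [List.nodup_append, hnd]
      exact hdisj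
  · intro p hp
    cases hget : g.get? k with
    | none =>
        rw [pv_modify_items_none g k m hget] at hp
        rcases List.mem_append.mp hp with h | h
        · exact hval p h
        · simp at h
          subst h
          exact ⟨by simp, by intro x hx; simp at hx; omega⟩
    | some vs =>
        rw [pv_modify_items_some g k m vs hget] at hp
        obtain ⟨q, hq, hpq⟩ := List.mem_map.mp hp
        by_cases hqk : q.1 == k
        · rw [if_pos hqk] at hpq
          subst hpq
          obtain ⟨hne, hpos⟩ := hval _ (PySem.Dict.mem_items_of_get?_eq_some g hget)
          refine ⟨by simp, ?_⟩
          intro x hx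
          rcases List.mem_append.mp hx with h | h
          · exact hpos x h
          · simp at h; omega
        · rw [if_neg hqk] at hpq
          subst hpq
          exact hval q hq

lemma pv_step (a : PySem.Dict Int Int) (g : PySem.Dict Int (List Int)) (e : Int × Int)
    (hR : a = PySem.Dict.mk (g.items.map pvF2)) (hG : pvGood g) :
    pvStepA a e = PySem.Dict.mk ((pvStepB g e).items.map pvF2) ∧ pvGood (pvStepB g e) := by
  rcases e with ⟨k, m⟩
  unfold pvStepA pvStepB
  simp only
  by_cases hm : m > 0
  · rw [if_pos hm]
    refine ⟨?_, pv_good_modify g k m hG hm⟩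
    cases hget : g.get? k with
    | none =>
        have hcont : a.contains k = false := by
          rw [hR, pv_contains_map, PySem.Dict.contains_eq_isSome_get?, hget]; rfl
        have hgd : a.getD k 0 = 0 := by rw [hR, pv_getD_map, hget]
        rw [if_pos (by rw [hgd]; exact hm)]
        apply PySem.Dict.ext
        rw [PySem.Dict.items_insert_of_not_contains a _ hcont, pv_modify_items_none g k m hget]
        rw [hR]
        show g.items.map pvF2 ++ [(k, m)] = (g.items ++ [(k, [m])]).map pvF2
        rw [List.map_append]
        rfl
    | some vs =>
        have hcont : a.contains k = true := by
          rw [hR, pv_contains_map, PySem.Dict.contains_eq_isSome_get?, hget]; rfl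
        have hgd : a.getD k 0 = (PySem.List.max? vs id).getD 0 := by rw [hR, pv_getD_map, hget]
        have hitems : (g.modify k [] (fun ms => ms ++ [m])).items.map pvF2
            = g.items.map (fun p => if p.1 == k then
                (k, (PySem.List.max? (vs ++ [m]) id).getD 0) else pvF2 p) := by
          rw [pv_modify_items_some g k m vs hget, List.map_map]
          apply List.map_congr_left
          intro p _
          by_cases hpk : p.1 == k
          · simp only [Function.comp, if_pos hpk]; rfl
          · simp only [Function.comp, if_neg hpk]
        by_cases hlt : (PySem.List.max? vs id).getD 0 < m
        · rw [if_pos (by rw [hgd]; exact hlt)]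
          apply PySem.Dict.ext
          rw [PySem.Dict.items_insert_of_contains a _ hcont, hitems, hR]
          show (g.items.map pvF2).map (fun p => if p.1 == k then (k, m) else p) = _
          rw [List.map_map]
          apply List.map_congr_left
          intro p _
          have hmax : PySem.List.max? (vs ++ [m]) id = some m := by
            cases h0 : PySem.List.max? vs id with
            | none => exact pv_max_append_none vs m h0
            | some M =>
                rw [h0] at hlt
                simp only [Option.getD_some] at hlt
                rw [pv_max_append_some vs m M h0, if_pos hlt]
          by_cases hpk : p.1 == k
          · simp only [Function.comp, pvF2, hpk, if_pos, hmax]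
            rfl
          · simp only [Function.comp, pvF2, hpk]
            rfl
        · rw [if_neg (by rw [hgd]; exact hlt)]
          apply PySem.Dict.ext
          rw [hitems, hR]
          show g.items.map pvF2 = _
          apply List.map_congr_left
          intro p hp
          by_cases hpk : p.1 == k
          · have hk : p.1 = k := by simpa using hpk
            have hvs : p.2 = vs := by
              have h1 : g.get? p.1 = some p.2 :=
                PySem.Dict.get?_of_mem_items g (by simpa using hp) hG.1
              rw [hk, hget] at h1
              exact (Option.some_inj.mp h1).symm
            have hsome : PySem.List.max? vs id = some ((PySem.List.max? vs id).getD 0) := by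
              cases h0 : PySem.List.max? vs id with
              | none =>
                  exfalso
                  have : vs = [] := (PySem.List.max?_eq_none_iff vs id).mp h0
                  have := pv_pos_of_get? g k vs hG hget
                  rw [h0] at this
                  simp at this
              | some M => rfl
            have hmax : PySem.List.max? (vs ++ [m]) id
                = some ((PySem.List.max? vs id).getD 0) := by
              rw [pv_max_append_some vs m _ hsome, if_neg hlt]
            rw [if_pos hpk, hmax]
            show (p.1, (PySem.List.max? p.2 id).getD 0) = _
            rw [hk, hvs, Option.getD_some]
          · rw [if_neg hpk]
  · rw [if_neg hm]
    refine ⟨?_, hG⟩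
    have hge : ¬ m > a.getD k 0 := by
      rw [hR, pv_getD_map]
      cases hget : g.get? k with
      | none => show ¬ m > (0 : Int); omega
      | some vs =>
          have := pv_pos_of_get? g k vs hG hget
          show ¬ m > (PySem.List.max? vs id).getD 0
          omega
    rw [if_neg hge, hR]

lemma pv_fold (ev : List (Int × Int)) :
    ∀ (a : PySem.Dict Int Int) (g : PySem.Dict Int (List Int)),
      a = PySem.Dict.mk (g.items.map pvF2) → pvGood g →
      ev.foldl pvStepA a = PySem.Dict.mk ((ev.foldl pvStepB g).items.map pvF2) := by
  induction ev with
  | nil => intro a g hR _; simpa using hR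
  | cons e rest ih =>
      intro a g hR hG
      obtain ⟨h1, h2⟩ := pv_step a g e hR hG
      simpa using ih (pvStepA a e) (pvStepB g e) h1 h2

lemma pv_side (vis : List (Int × List (Int × List (String × Int)))) :
    (vis.foldl (fun acc p =>
      p.2.foldl (fun acc q =>
        if q.2 = [] then acc
        else
          let mx := (PySem.List.max? (q.2.map (fun r => r.2)) id).getD 0
          let cur := acc.getD q.1 0
          if mx > cur then acc.insert q.1 mx else acc) acc) PySem.Dict.empty).items
      = (pvGroupMaxima vis).items.map (fun p => (p.1, (PySem.List.max? p.2 id).getD 0)) := by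
  have hA : (vis.foldl (fun acc p =>
      p.2.foldl (fun acc q => if q.2 = [] then acc else pvStepA acc (q.1, pvMx q.2)) acc)
      (PySem.Dict.empty : PySem.Dict Int Int)) = (pvEvents vis).foldl pvStepA PySem.Dict.empty :=
    pv_nested pvStepA vis PySem.Dict.empty
  have hB : pvGroupMaxima vis = (pvEvents vis).foldl pvStepB PySem.Dict.empty := by
    unfold pvGroupMaxima
    exact pv_nested pvStepB vis PySem.Dict.empty
  have hgood : pvGood (PySem.Dict.empty : PySem.Dict Int (List Int)) := by
    constructor
    · simp [PySem.Dict.keys, PySem.Dict.empty]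
    · intro p hp; simp [PySem.Dict.empty] at hp
  have hfold := pv_fold (pvEvents vis) PySem.Dict.empty PySem.Dict.empty rfl hgood
  calc (vis.foldl (fun acc p =>
      p.2.foldl (fun acc q =>
        if q.2 = [] then acc
        else
          let mx := (PySem.List.max? (q.2.map (fun r => r.2)) id).getD 0
          let cur := acc.getD q.1 0
          if mx > cur then acc.insert q.1 mx else acc) acc) PySem.Dict.empty).items
      = ((pvEvents vis).foldl pvStepA PySem.Dict.empty).items := by rw [← hA]; rfl
    _ = (((pvEvents vis).foldl pvStepB PySem.Dict.empty).items.map pvF2) := by rw [hfold]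
    _ = (pvGroupMaxima vis).items.map (fun p => (p.1, (PySem.List.max? p.2 id).getD 0)) := by
        rw [hB]; rfl

-- ===== VERDICT (by name: the statement is the Claim_ definition above) =====
theorem compute_daywise_max_visibility_spec : Claim_equal_compute_daywise_max_visibility := by
  intro v4 v6 _
  unfold Spec_compute_daywise_max_visibility compute_daywise_max_visibility compute_daywise_max_visibility_alt
  exact Prod.ext (pv_side v4) (pv_side v6)
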